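-- pv_equiv track=rewrite | github.com/Gvex95/BlackJackMindFuck | BlackJack/BlackJack.py | IshodRunde
-- ===== SOURCE A (Python) =====
-- spil = [1,2,3,4,5,6,7,8,9,10,10,10,10,
--         1,2,3,4,5,6,7,8,9,10,10,10,10,
--         1,2,3,4,5,6,7,8,9,10,10,10,10,
--         1,2,3,4,5,6,7,8,9,10,10,10,10,]
--
-- def IshodRunde(i,h):
--     igrac = 0
--     delilac = 0
--     #ako delimo neparan broj karti, npr delimo do 7 do 12 karte,dele se od 7 do 11, a zadnju kartu gledamo posebno
--     #while deli 4 karte koje i igrac i delilac moraju da uzmu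
--     while(i<(h-(h-i)%2)):
--         if (spil[i] == 1 and igrac <=10):
--             igrac+=11
--         else:
--             igrac+=spil[i]
--         if(spil[i+1] == 1 and delilac<=10):
--             delilac+=11
--         else:
--             delilac+=spil[i+1]
--
--         i+=2 #jer prvo uzima igrac pa delilac pa opet igrac pa opet delilac
--
--     #nakon podeljene 4 karte
--     if ((h-i)%2 != 0):
--         if (spil[h-1] == 1 and igrac<=10):
--             igrac+=11
--         else:
--             if(igrac + spil[h-1]<=21):
--                 igrac += spil[h-1]
--             #igrac  ne vuce jer ce preci 21, znaci red je na dilera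
--             else:
--                 if (spil[h-1] == 1 and delilac <=10):
--                     delilac+=11
--                 else:
--                     if(delilac>igrac):
--                         return -4
--                     else:
--                         delilac+= spil[h-1]
--
--     if (delilac<17):
--         return -4
--     if (igrac>21):
--         return -1
--     if (delilac>21):
--         return 1
--     if (igrac>delilac):
--         return 1
--     if (igrac == delilac):
--         return 0
--     if (igrac < delilac):
--         return -1
-- ===== SOURCE B (Python) =====
-- spil = [1,2,3,4,5,6,7,8,9,10,10,10,10]*4
--
-- def _hand(cards):
--     # Closed-form hand value: run-of-play ace rule collapses to "the first ace
--     # counts 11 iff the face-value sum of the cards before it is <= 10"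
--     # (once any ace counts 11 the total stays above 10, so later aces add 1).
--     s = sum(cards)
--     if 1 in cards and sum(cards[:cards.index(1)]) <= 10:
--         s += 10
--     return s
--
-- def IshodRunde(i, h):
--     e = h - (h - i) % 2                      # end of the evenly-paired region
--     igrac = _hand([spil[j] for j in range(i, e, 2)])
--     delilac = _hand([spil[j] for j in range(i + 1, e, 2)])
--     if (h - i) % 2 != 0:                     # leftover odd card
--         c = spil[h - 1]
--         if c == 1 and igrac <= 10:
--             igrac += 11
--         elif igrac + c <= 21:
--             igrac += c
--         elif c == 1 and delilac <= 10:
--             delilac += 11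
--         elif delilac > igrac:
--             return -4
--         else:
--             delilac += c
--     if delilac < 17:
--         return -4
--     if igrac > 21:
--         return -1
--     if delilac > 21:
--         return 1
--     if igrac > delilac:
--         return 1
--     if igrac == delilac:
--         return 0
--     return -1
-- ===== Notes on version B (the rewrite author's own statement) =====
-- stated objective: alternative
-- what changed: Replaces A's running-total accumulation (interleaved while loop applying the ace rule card by card) with a closed-form hand evaluation: each hand's cards are gathered into a list and valued as sum(cards) plus 10 iff the face-value sum before the first ace is <= 10, which is proved equal to the running ace rule; the coupled leftover-card block and the verdict cascade are kept.
import Mathlib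
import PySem

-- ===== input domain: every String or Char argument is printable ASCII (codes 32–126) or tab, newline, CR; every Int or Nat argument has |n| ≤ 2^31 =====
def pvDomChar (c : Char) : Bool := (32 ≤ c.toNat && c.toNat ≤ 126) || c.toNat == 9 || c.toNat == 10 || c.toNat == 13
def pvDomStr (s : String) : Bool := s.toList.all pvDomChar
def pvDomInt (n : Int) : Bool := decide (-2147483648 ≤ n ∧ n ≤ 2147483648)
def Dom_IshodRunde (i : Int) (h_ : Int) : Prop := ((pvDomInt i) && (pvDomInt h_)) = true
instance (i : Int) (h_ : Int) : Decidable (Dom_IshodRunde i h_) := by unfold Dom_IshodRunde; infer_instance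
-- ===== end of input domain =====

-- B values each hand in closed form (sum of cards, +10 iff the prefix before the first ace sums to <= 10) instead of A's interleaved card-by-card running-total loop; same cost (alternative algorithm).


-- the module-level deck, shared by both Pythons
def spil : List Int :=
  [1,2,3,4,5,6,7,8,9,10,10,10,10,
   1,2,3,4,5,6,7,8,9,10,10,10,10,
   1,2,3,4,5,6,7,8,9,10,10,10,10,
   1,2,3,4,5,6,7,8,9,10,10,10,10]

-- ===== PORT A =====
-- A's final if-cascade (Python falls through six returns; igrac < delilac is the only case left at the end)
def IshodRundeCascade (igrac delilac : Int) : Int :=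
  if delilac < 17 then -4
  else if igrac > 21 then -1
  else if delilac > 21 then 1
  else if igrac > delilac then 1
  else if igrac = delilac then 0
  else -1

-- A's while loop; spil[j] is pyGetD (in-range under Pre_); returns (final i, igrac, delilac)
def IshodRundeLoop (h_ i igrac delilac : Int) : Int × Int × Int :=
  if i < h_ - PySem.Int.mod (h_ - i) 2 then
    IshodRundeLoop h_ (i + 2)
      (if PySem.List.pyGetD spil i 0 = 1 ∧ igrac ≤ 10 then igrac + 11
       else igrac + PySem.List.pyGetD spil i 0)
      (if PySem.List.pyGetD spil (i + 1) 0 = 1 ∧ delilac ≤ 10 then delilac + 11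
       else delilac + PySem.List.pyGetD spil (i + 1) 0)
  else (i, igrac, delilac)
termination_by (h_ - i).toNat
decreasing_by
  have h0 := PySem.Int.mod_nonneg (h_ - i) (by norm_num : (0:Int) < 2)
  omega

def IshodRunde (i : Int) (h_ : Int) : Int :=
  let r := IshodRundeLoop h_ i 0 0
  let igrac := r.2.1
  let delilac := r.2.2
  if PySem.Int.mod (h_ - r.1) 2 ≠ 0 then
    let c := PySem.List.pyGetD spil (h_ - 1) 0
    if c = 1 ∧ igrac ≤ 10 then IshodRundeCascade (igrac + 11) delilac
    else if igrac + c ≤ 21 then IshodRundeCascade (igrac + c) delilac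
    else if c = 1 ∧ delilac ≤ 10 then IshodRundeCascade igrac (delilac + 11)
    else if delilac > igrac then -4
    else IshodRundeCascade igrac (delilac + c)
  else IshodRundeCascade igrac delilac

-- ===== PORT B =====
-- Source B's _hand: closed-form hand value; cards[:cards.index(1)] is take of the found index (a Nat, so exact)
def pvHand (cards : List Int) : Int :=
  let s := cards.sum
  if (1:Int) ∈ cards then
    if (cards.take ((PySem.List.index? cards 1).getD 0)).sum ≤ 10 then s + 10 else s
  else s

-- Source B's trailing verdict cascade
def pvVerdict (igrac delilac : Int) : Int :=
  if delilac < 17 then -4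
  else if igrac > 21 then -1
  else if delilac > 21 then 1
  else if igrac > delilac then 1
  else if igrac = delilac then 0
  else -1

def IshodRunde_alt (i : Int) (h_ : Int) : Int :=
  let e := h_ - PySem.Int.mod (h_ - i) 2
  let igrac := pvHand ((PySem.List.pyRange i e 2).map (fun j => PySem.List.pyGetD spil j 0))
  let delilac := pvHand ((PySem.List.pyRange (i + 1) e 2).map (fun j => PySem.List.pyGetD spil j 0))
  if PySem.Int.mod (h_ - i) 2 ≠ 0 then
    let c := PySem.List.pyGetD spil (h_ - 1) 0
    if c = 1 ∧ igrac ≤ 10 then pvVerdict (igrac + 11) delilac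
    else if igrac + c ≤ 21 then pvVerdict (igrac + c) delilac
    else if c = 1 ∧ delilac ≤ 10 then pvVerdict igrac (delilac + 11)
    else if delilac > igrac then -4
    else pvVerdict igrac (delilac + c)
  else pvVerdict igrac delilac

-- ===== PRECONDITION & SPEC =====
-- Pre_ excludes exactly the IndexError inputs: when the paired loop runs it touches spil[i..e-1],
-- and an odd leftover touches spil[h-1]; Python accepts indices in [-52, 52) on the 52-card deck.
def Pre_IshodRunde (i : Int) (h_ : Int) : Prop :=
  (i < h_ - PySem.Int.mod (h_ - i) 2 → (-52 ≤ i ∧ h_ - PySem.Int.mod (h_ - i) 2 ≤ 52)) ∧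
  (PySem.Int.mod (h_ - i) 2 ≠ 0 → (-51 ≤ h_ ∧ h_ ≤ 52))
instance (i : Int) (h_ : Int) : Decidable (Pre_IshodRunde i h_) := by unfold Pre_IshodRunde; infer_instance
def pvWitness_IshodRunde : Int × Int := (0, 5)

def Spec_IshodRunde (i : Int) (h_ : Int) (out : Int) : Prop := out = IshodRunde_alt i h_
instance (i : Int) (h_ : Int) (out : Int) : Decidable (Spec_IshodRunde i h_ out) := by unfold Spec_IshodRunde; infer_instance

-- ===== CLAIM (what is proved, stated in full; the proofs are below) =====
def Claim_equal_IshodRunde : Prop := ∀ (i : Int) (h_ : Int), Dom_IshodRunde i h_ → Pre_IshodRunde i h_ → Spec_IshodRunde i h_ (IshodRunde i h_)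

-- ===== LEMMAS AND PROOFS =====

-- one card into a hand, A's running ace rule (proof-side abbreviation of A's loop body step)
def pvHit (t c : Int) : Int := if c = 1 ∧ t ≤ 10 then t + 11 else t + c

lemma pyRange_two_nil (a b : Int) (h : b ≤ a) : PySem.List.pyRange a b 2 = [] := by
  rw [PySem.List.pyRange_of_pos a b (by norm_num)]
  simp [show ¬ a < b by omega]

lemma pyRange_two_cons (a b : Int) (h : a < b) :
    PySem.List.pyRange a b 2 = a :: PySem.List.pyRange (a + 2) b 2 := by
  rw [PySem.List.pyRange_of_pos a b (by norm_num),
      PySem.List.pyRange_of_pos (a + 2) b (by norm_num)]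
  by_cases h2 : a + 2 < b
  · have hn : ((b - a + 2 - 1) / 2).toNat = ((b - (a + 2) + 2 - 1) / 2).toNat + 1 := by omega
    rw [if_pos h, if_pos h2, hn, List.range_succ_eq_map, List.map_cons, List.map_map]
    congr 1
    · simp
    · apply List.map_congr_left
      intro k _
      simp only [Function.comp_apply]
      push_cast
      ring
  · have hn : ((b - a + 2 - 1) / 2).toNat = 1 := by omega
    rw [if_pos h, if_neg h2, hn]
    simp

-- the interleaved loop computes the two per-hand running-total folds and preserves the parity of h - i
lemma IshodRundeLoop_spec (h_ i g d : Int) :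
    (IshodRundeLoop h_ i g d).2 =
      ((PySem.List.pyRange i (h_ - PySem.Int.mod (h_ - i) 2) 2).foldl
         (fun t j => pvHit t (PySem.List.pyGetD spil j 0)) g,
       (PySem.List.pyRange (i + 1) (h_ - PySem.Int.mod (h_ - i) 2) 2).foldl
         (fun t j => pvHit t (PySem.List.pyGetD spil j 0)) d) ∧
    PySem.Int.mod (h_ - (IshodRundeLoop h_ i g d).1) 2 = PySem.Int.mod (h_ - i) 2 := by
  induction i, g, d using IshodRundeLoop.induct h_ with
  | case1 i g d hcond ih =>
    have hm := PySem.Int.mod_eq_emod_of_pos (a := h_ - i) (b := 2) (by norm_num)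
    have hm2 := PySem.Int.mod_eq_emod_of_pos (a := h_ - (i + 2)) (b := 2) (by norm_num)
    have hpar : PySem.Int.mod (h_ - (i + 2)) 2 = PySem.Int.mod (h_ - i) 2 := by
      rw [hm, hm2]; omega
    have hcond' := hcond
    rw [hm] at hcond'
    have hstep : i + 2 ≤ h_ - PySem.Int.mod (h_ - i) 2 := by rw [hm]; omega
    obtain ⟨ihb, ihp⟩ := ih
    simp only [dite_eq_ite] at ihb ihp
    have h321 : i + 2 + 1 = i + 1 + 2 := by ring
    rw [hpar, h321] at ihb
    rw [hpar] at ihp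
    rw [IshodRundeLoop, if_pos hcond]
    refine ⟨?_, ihp⟩
    rw [ihb, pyRange_two_cons i _ (by omega), pyRange_two_cons (i + 1) _ (by omega)]
    simp only [List.foldl_cons, pvHit]
  | case2 i g d hcond =>
    rw [IshodRundeLoop, if_neg hcond]
    have hnil1 : PySem.List.pyRange i (h_ - PySem.Int.mod (h_ - i) 2) 2 = [] :=
      pyRange_two_nil _ _ (by omega)
    have hnil2 : PySem.List.pyRange (i + 1) (h_ - PySem.Int.mod (h_ - i) 2) 2 = [] :=
      pyRange_two_nil _ _ (by omega)
    simp only [hnil1, hnil2, List.foldl_nil]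
    exact ⟨trivial, trivial⟩

-- once the total is ≥ 11 no ace counts 11 again, so the fold just adds face values
lemma foldl_pvHit_of_ge (cards : List Int) : ∀ t : Int, (∀ c ∈ cards, 0 ≤ c) → 11 ≤ t →
    cards.foldl pvHit t = t + cards.sum := by
  induction cards with
  | nil => intro t _ _; simp
  | cons c rest ih =>
    intro t hnn ht
    have hc : 0 ≤ c := hnn c (by simp)
    have hstep : pvHit t c = t + c := by
      simp only [pvHit, if_neg (by omega : ¬ (c = 1 ∧ t ≤ 10))]
    rw [List.foldl_cons, hstep, ih (t + c) (fun x hx => hnn x (by simp [hx])) (by omega)]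
    simp; ring

-- the running ace rule in closed form: starting from 0 ≤ t ≤ 10, the fold is
-- t + sum, plus 10 exactly when an ace exists and t + (prefix before the first ace) ≤ 10
lemma foldl_pvHit_closed (cards : List Int) : ∀ t : Int, (∀ c ∈ cards, 0 ≤ c) → 0 ≤ t → t ≤ 10 →
    cards.foldl pvHit t =
      t + cards.sum +
        (if (1:Int) ∈ cards ∧ t + (cards.take ((PySem.List.index? cards 1).getD 0)).sum ≤ 10
         then 10 else 0) := by
  induction cards with
  | nil => intro t _ _ _; simp
  | cons c rest ih =>
    intro t hnn ht0 ht10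
    have hc : 0 ≤ c := hnn c (by simp)
    have hrest : ∀ x ∈ rest, 0 ≤ x := fun x hx => hnn x (by simp [hx])
    by_cases hc1 : c = 1
    · subst hc1
      have hstep : pvHit t 1 = t + 11 := by simp [pvHit, ht10]
      rw [List.foldl_cons, hstep, foldl_pvHit_of_ge rest (t + 11) hrest (by omega)]
      rw [PySem.List.index?_cons_self]
      simp only [Option.getD_some, List.take_zero, List.sum_nil, List.sum_cons]
      rw [if_pos ⟨by simp, by omega⟩]
      ring
    · have hstep : pvHit t c = t + c := by
        simp only [pvHit, if_neg (by tauto : ¬ (c = 1 ∧ t ≤ 10))]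
      have hmem : ((1:Int) ∈ c :: rest) ↔ ((1:Int) ∈ rest) := by
        simp [Ne.symm hc1]
      rw [List.foldl_cons, hstep]
      by_cases hle : t + c ≤ 10
      · rw [ih (t + c) hrest (by omega) hle]
        by_cases hmr : (1:Int) ∈ rest
        · obtain ⟨k, hk⟩ := (PySem.List.index?_isSome_iff rest 1).2 hmr |> Option.isSome_iff_exists.1
          have hkc : PySem.List.index? (c :: rest) 1 = some (k + 1) := by
            rw [PySem.List.index?_cons_of_ne rest hc1, hk]; rfl
          rw [hk, hkc]
          simp only [Option.getD_some, List.take_succ_cons, List.sum_cons, List.sum_cons]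
          have hiff : ((1:Int) ∈ rest ∧ t + c + (rest.take k).sum ≤ 10) ↔
              ((1:Int) ∈ c :: rest ∧ t + (c + (rest.take k).sum) ≤ 10) := by
            constructor
            · rintro ⟨_, h⟩; exact ⟨by simp [hmr], by omega⟩
            · rintro ⟨_, h⟩; exact ⟨hmr, by omega⟩
          simp only [hiff]
          split_ifs <;> ring
        · have hne : PySem.List.index? (c :: rest) 1 = none := by
            rw [PySem.List.index?_eq_none_iff]
            simp [Ne.symm hc1, hmr]
          rw [hne]
          simp only [if_neg (by tauto : ¬ ((1:Int) ∈ rest ∧ t + c + (rest.take ((PySem.List.index? rest 1).getD 0)).sum ≤ 10)),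
                     if_neg (by rw [hmem]; tauto : ¬ ((1:Int) ∈ c :: rest ∧ t + ((c :: rest).take ((none : Option Nat).getD 0)).sum ≤ 10))]
          simp; ring
      · -- t + c ≥ 11: everything after is face value, and the closed-form condition is false
        rw [foldl_pvHit_of_ge rest (t + c) hrest (by omega)]
        have hcond : ¬ ((1:Int) ∈ c :: rest ∧
            t + ((c :: rest).take ((PySem.List.index? (c :: rest) 1).getD 0)).sum ≤ 10) := by
          rintro ⟨hm, hs⟩
          have hmr : (1:Int) ∈ rest := hmem.1 hm
          obtain ⟨k, hk⟩ := (PySem.List.index?_isSome_iff rest 1).2 hmr |> Option.isSome_iff_exists.1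
          have hkc : PySem.List.index? (c :: rest) 1 = some (k + 1) := by
            rw [PySem.List.index?_cons_of_ne rest hc1, hk]; rfl
          rw [hkc] at hs
          simp only [Option.getD_some, List.take_succ_cons, List.sum_cons] at hs
          have : 0 ≤ (rest.take k).sum :=
            List.sum_nonneg (fun x hx => hrest x (List.mem_of_mem_take hx))
          omega
        rw [if_neg hcond]
        simp; ring
  
-- the closed-form _hand equals the running fold on nonnegative cards
lemma pvHand_eq_foldl (cards : List Int) (hnn : ∀ c ∈ cards, 0 ≤ c) :
    pvHand cards = cards.foldl pvHit 0 := by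
  rw [foldl_pvHit_closed cards 0 hnn (le_refl 0) (by norm_num)]
  unfold pvHand
  by_cases hm : (1:Int) ∈ cards
  · simp only [hm, true_and, zero_add]
    split_ifs <;> ring
  · simp [hm]

-- every card fetched from the deck (or the default) is nonnegative
lemma pyGetD_spil_nonneg (j : Int) : 0 ≤ PySem.List.pyGetD spil j 0 := by
  unfold PySem.List.pyGetD
  cases h : PySem.List.pyGet? spil j with
  | none => simp
  | some v =>
    have hv : v ∈ spil := PySem.List.mem_of_pyGet?_eq_some spil h
    simp only [Option.getD_some]
    have : ∀ x ∈ spil, 0 ≤ x := by decide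
    exact this v hv

-- ===== VERDICT (by name: the statement is the Claim_ definition above) =====
theorem IshodRunde_spec : Claim_equal_IshodRunde := by
  intro i h_ _ _
  unfold Spec_IshodRunde IshodRunde IshodRunde_alt
  obtain ⟨hb, hp⟩ := IshodRundeLoop_spec h_ i 0 0
  have hcv : ∀ a b : Int, IshodRundeCascade a b = pvVerdict a b := fun _ _ => rfl
  have hhand : ∀ a : Int,
      pvHand ((PySem.List.pyRange a (h_ - PySem.Int.mod (h_ - i) 2) 2).map
        (fun j => PySem.List.pyGetD spil j 0)) =
      (PySem.List.pyRange a (h_ - PySem.Int.mod (h_ - i) 2) 2).foldl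
        (fun t j => pvHit t (PySem.List.pyGetD spil j 0)) 0 := by
    intro a
    rw [pvHand_eq_foldl _ (by
      intro c hc
      obtain ⟨j, _, rfl⟩ := List.mem_map.1 hc
      exact pyGetD_spil_nonneg j)]
    rw [List.foldl_map]
  simp only [hb, hp, hcv, hhand]
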